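-- pv_equiv track=rewrite | github.com/KoKwanwun/Algorithm | Level-3/최고의 집합.py | solution
-- ===== SOURCE A (Python) =====
-- def solution(n, s):
--     answer = []
--     if s < n:               # 존재하지 않음
--         return [-1]
--
--     num = s // n            # 값 개수만큼 나누어 중심이 되는 값
--     for _ in range(n):
--         answer.append(num)
--
--     for i in range(s % n):  # 나머지만큼 원소에 1을 더하여 곱했을 때 최대값 만들기
--         answer[i] += 1
--
--     return sorted(answer)   # 오름차순
-- ===== SOURCE B (Python) =====
-- def solution(n, s):
--     if s < n:
--         return [-1]
--     out = []
--     while n > 0: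
--         q = -(-s // n)      # greedy: largest element is ceil of the remaining average
--         out.append(q)
--         s -= q
--         n -= 1
--     out.reverse()
--     return out
-- ===== Notes on version B (the rewrite author's own statement) =====
-- stated objective: alternative
-- what changed: B is a greedy peeling loop: it repeatedly emits ceil(s/n) of the remaining sum/count, decrementing both, and reverses the descending output, instead of A's fill-with-floor pass, per-index +1 pass and final sort.
import Mathlib
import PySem

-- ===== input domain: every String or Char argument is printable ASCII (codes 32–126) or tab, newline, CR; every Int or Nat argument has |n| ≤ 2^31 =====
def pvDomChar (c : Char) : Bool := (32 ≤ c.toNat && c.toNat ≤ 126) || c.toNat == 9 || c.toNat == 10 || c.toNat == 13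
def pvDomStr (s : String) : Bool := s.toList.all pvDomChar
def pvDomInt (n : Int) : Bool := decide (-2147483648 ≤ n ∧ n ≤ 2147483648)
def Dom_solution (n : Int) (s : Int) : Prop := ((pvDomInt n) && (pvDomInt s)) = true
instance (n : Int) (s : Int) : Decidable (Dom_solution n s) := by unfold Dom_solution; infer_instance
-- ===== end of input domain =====

-- B replaces A's fill-with-floor / per-index-increment / sort pipeline by a greedy peeling
-- loop: repeatedly emit ceil(s/n) of the remaining sum/count, then reverse (alternative).

-- ===== PORT A =====
def solution (n : Int) (s : Int) : List Int :=
  if s < n then [-1]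
  else
    let num := PySem.Int.floordiv s n
    let answer := (PySem.List.pyRange 0 n 1).foldl (fun acc _ => acc ++ [num]) []
    let answer := (PySem.List.pyRange 0 (PySem.Int.mod s n) 1).foldl
      (fun acc i => acc.modify i.toNat (· + 1)) answer
    PySem.List.sorted answer (fun x => x) false

-- ===== PORT B =====
-- B's while loop: runs exactly n.toNat times (n decreases by 1 each pass, stops at n ≤ 0).
def solAltLoop : Nat → Int → Int → List Int → List Int
  | 0, _, _, out => out
  | Nat.succ k, n, s, out =>
      let q := -(PySem.Int.floordiv (-s) n)   -- -(-s // n) = ceil(s / n)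
      solAltLoop k (n - 1) (s - q) (out ++ [q])

def solution_alt (n : Int) (s : Int) : List Int :=
  if s < n then [-1]
  else (solAltLoop n.toNat n s []).reverse

-- ===== PRECONDITION & SPEC =====
-- Pre_ excludes exactly n = 0 with 0 ≤ s, where A raises ZeroDivisionError on s // n.
def Pre_solution (n : Int) (s : Int) : Prop := ¬ (n = 0 ∧ 0 ≤ s)
instance (n : Int) (s : Int) : Decidable (Pre_solution n s) := by unfold Pre_solution; infer_instance
def pvWitness_solution : Int × Int := (3, 10)

def Spec_solution (n : Int) (s : Int) (out : List Int) : Prop := out = solution_alt n s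
instance (n : Int) (s : Int) (out : List Int) : Decidable (Spec_solution n s out) := by unfold Spec_solution; infer_instance

-- ===== CLAIM (what is proved, stated in full; the proofs are below) =====
def Claim_equal_solution : Prop := ∀ (n : Int) (s : Int), Dom_solution n s → Pre_solution n s → Spec_solution n s (solution n s)

-- ===== LEMMAS AND PROOFS =====

-- A's first loop: appending one copy per iteration builds a replicate.
theorem pvFoldAppend (x : Int) (l : List Int) (acc : List Int) :
    l.foldl (fun a (_ : Int) => a ++ [x]) acc = acc ++ List.replicate l.length x := by
  induction l generalizing acc with
  | nil => simp
  | cons h t ih => simp [List.foldl_cons, ih, List.replicate_succ, List.append_assoc]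

-- modifying an append at the length of the first part hits the head of the second.
theorem pvModifyAt (f : Int → Int) : ∀ (as : List Int) (b : Int) (bs : List Int),
    (as ++ b :: bs).modify as.length f = as ++ f b :: bs := by
  intro as
  induction as with
  | nil => intro b bs; rfl
  | cons a t ih => intro b bs; simpa [List.modify] using ih b bs

-- A's second loop: incrementing indices 0..j-1 of replicate N x.
theorem pvIncLoop (x : Int) (N : Nat) : ∀ (j : Nat), j ≤ N →
    (PySem.List.pyRange 0 (j : Int) 1).foldl (fun acc i => acc.modify i.toNat (· + 1))
      (List.replicate N x)
    = List.replicate j (x + 1) ++ List.replicate (N - j) x := by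
  intro j
  induction j with
  | zero => intro _; simp
  | succ j ih =>
    intro hle
    have hj : j ≤ N := Nat.le_of_succ_le hle
    have hsplit : PySem.List.pyRange 0 ((j : Int) + 1) 1
        = PySem.List.pyRange 0 (j : Int) 1 ++ [(j : Int)] :=
      PySem.List.pyRange_one_succ_right (by exact_mod_cast Nat.zero_le j)
    have : ((j + 1 : Nat) : Int) = (j : Int) + 1 := by push_cast; ring
    rw [this, hsplit, List.foldl_append, ih hj]
    have hrep : List.replicate (N - j) x = x :: List.replicate (N - j - 1) x := by
      have h2 : N - j = (N - j - 1) + 1 := by omega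
      rw [h2, List.replicate_succ]
      simp
    simp only [List.foldl]
    rw [hrep]
    have hmod : (List.replicate j (x + 1) ++ x :: List.replicate (N - j - 1) x).modify
        (j : Int).toNat (· + 1)
        = List.replicate j (x + 1) ++ (x + 1) :: List.replicate (N - j - 1) x := by
      have h1 : (j : Int).toNat = (List.replicate j (x + 1)).length := by simp
      rw [h1, pvModifyAt]
    rw [hmod]
    simp [List.replicate_succ', Nat.sub_add_eq, List.append_assoc]

-- sorted of (r copies of x+1 then m copies of x) is (m copies of x then r copies of x+1).
theorem pvSortedRep (x : Int) (r m : Nat) :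
    PySem.List.sorted (List.replicate r (x + 1) ++ List.replicate m x) (fun y => y) false
    = List.replicate m x ++ List.replicate r (x + 1) := by
  apply PySem.List.sorted_id_eq_of_perm_of_pairwise
  · exact List.perm_append_comm
  · apply List.pairwise_append.mpr
    refine ⟨List.pairwise_replicate.mpr (by omega), List.pairwise_replicate.mpr (by omega), ?_⟩
    intro a ha b hb
    rw [List.eq_of_mem_replicate ha, List.eq_of_mem_replicate hb]
    omega

-- B's greedy loop on k elements summing to k*x + r (0 ≤ r, r = 0 or r < k):
-- it emits r copies of x+1 followed by k-r copies of x (descending order).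
theorem pvLoopSpec : ∀ (k : Nat) (x r : Int) (acc : List Int), 0 ≤ r → (r = 0 ∨ r < (k : Int)) →
    solAltLoop k (k : Int) ((k : Int) * x + r) acc
    = acc ++ List.replicate r.toNat (x + 1) ++ List.replicate (k - r.toNat) x := by
  intro k
  induction k with
  | zero =>
    intro x r acc h0 hcase
    have hr : r = 0 := by omega
    simp [solAltLoop, hr]
  | succ k ih =>
    intro x r acc h0 hcase
    have hk1 : ((k + 1 : Nat) : Int) = (k : Int) + 1 := by push_cast; ring
    have hkpos : (0 : Int) < (k : Int) + 1 := by positivity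
    by_cases hr0 : r = 0
    · -- ceil = x
      have hq : -(PySem.Int.floordiv (-(((k : Int) + 1) * x + r)) ((k : Int) + 1)) = x := by
        rw [PySem.Int.neg_floordiv_neg_eq_iff_of_pos hkpos]
        constructor <;> nlinarith
      show solAltLoop (k + 1) ((k + 1 : Nat) : Int) (((k + 1 : Nat) : Int) * x + r) acc = _
      rw [hk1]
      simp only [solAltLoop, hq]
      have hs : ((k : Int) + 1) * x + r - x = (k : Int) * x + 0 := by rw [hr0]; ring
      have hn : (k : Int) + 1 - 1 = (k : Int) := by ring
      rw [hs, hn, ih x 0 (acc ++ [x]) le_rfl (Or.inl rfl)]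
      simp [hr0, List.replicate_succ, List.append_assoc]
    · -- r > 0 : ceil = x + 1
      have hrpos : 0 < r := by omega
      have hrlt : r < (k : Int) + 1 := by omega
      have hq : -(PySem.Int.floordiv (-(((k : Int) + 1) * x + r)) ((k : Int) + 1)) = x + 1 := by
        rw [PySem.Int.neg_floordiv_neg_eq_iff_of_pos hkpos]
        constructor <;> nlinarith
      show solAltLoop (k + 1) ((k + 1 : Nat) : Int) (((k + 1 : Nat) : Int) * x + r) acc = _
      rw [hk1]
      simp only [solAltLoop, hq]
      have hs : ((k : Int) + 1) * x + r - (x + 1) = (k : Int) * x + (r - 1) := by ring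
      have hn : (k : Int) + 1 - 1 = (k : Int) := by ring
      rw [hs, hn, ih x (r - 1) (acc ++ [x + 1]) (by omega) (by omega)]
      have h1 : r.toNat = (r - 1).toNat + 1 := by omega
      rw [h1]
      have h4 : k + 1 - ((r - 1).toNat + 1) = k - (r - 1).toNat := by omega
      rw [h4, List.replicate_succ]
      simp [List.append_assoc]

-- ===== VERDICT (by name: the statement is the Claim_ definition above) =====
theorem solution_spec : Claim_equal_solution := by
  intro n s _ hpre
  unfold Spec_solution solution solution_alt
  by_cases hlt : s < n
  · simp [hlt]
  · simp only [hlt, if_false]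
    have hn : n ≠ 0 := by
      intro h; exact hpre ⟨h, by omega⟩
    set num := PySem.Int.floordiv s n with hnum
    set r := PySem.Int.mod s n with hr
    rcases lt_or_gt_of_ne hn with hneg | hpos
    · -- n < 0 : A's loops and B's loop are all empty
      have hrb := PySem.Int.mod_neg_bounds (a := s) (b := n) hneg
      have h1 : PySem.List.pyRange 0 n 1 = [] :=
        PySem.List.pyRange_one_eq_nil (by omega)
      have h2 : PySem.List.pyRange 0 r 1 = [] :=
        PySem.List.pyRange_one_eq_nil (by omega)
      have h3 : n.toNat = 0 := by omega
      simp [h1, h2, h3, solAltLoop, PySem.List.sorted]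
    · -- n > 0
      have hr0 : 0 ≤ r := PySem.Int.mod_nonneg (a := s) hpos
      have hrn : r < n := PySem.Int.mod_lt (a := s) hpos
      -- A's side: replicate (n-r) num ++ replicate r (num+1), via the two loop lemmas and sort
      rw [pvFoldAppend]
      have hlen : (PySem.List.pyRange 0 n 1).length = n.toNat := by
        rw [PySem.List.length_pyRange_one]; simp
      rw [hlen, List.nil_append]
      have hcast : r = ((r.toNat : Nat) : Int) := by omega
      rw [hcast, pvIncLoop num n.toNat r.toNat (by omega), pvSortedRep]
      -- B's side: the greedy loop on n.toNat elements summing to s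
      have key := pvLoopSpec n.toNat num r [] hr0 (Or.inr (by omega))
      have hNcast : ((n.toNat : Nat) : Int) = n := by omega
      rw [hNcast] at key
      have hsum : n * num + r = s := by
        have := PySem.Int.floordiv_mul_add_mod s n
        rw [← hnum, ← hr] at this
        linarith [this]
      rw [hsum] at key
      rw [key]
      simp [List.reverse_append]
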